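-- pv_equiv track=rewrite | github.com/ikokkari/PythonProblems | labs109.py | oware_move
-- ===== SOURCE A (Python) =====
-- def oware_move(board, pos):
--     n, captured, orig = len(board), 0, pos
--     sow = board[pos]
--     board[pos] = 0
--     while sow > 0:
--         pos = (pos + 1) % n
--         if pos != orig:
--             board[pos] += 1
--             sow -= 1
--     while pos >= n // 2 and 2 <= board[pos] <= 3:
--         captured += board[pos]
--         board[pos] = 0
--         pos = (pos - 1) % n
--     return board
-- ===== SOURCE B (Python) =====
-- def oware_move(board, pos):
--     n = len(board)
--     sow = board[pos]
--     board[pos] = 0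
--     orig = pos % n
--     if sow > 0:
--         q, r = divmod(sow, n - 1)
--         board[:] = [0 if i == orig else
--                     board[i] + q + (1 if (i - orig) % n <= r else 0)
--                     for i in range(n)]
--         pos = (orig + r) % n if r > 0 else (orig - 1) % n
--     else:
--         pos = orig
--     while pos >= n // 2 and 2 <= board[pos] <= 3:
--         board[pos] = 0
--         pos = (pos - 1) % n
--     return board
-- ===== Notes on version B (the rewrite author's own statement) =====
-- stated objective: alternative
-- what changed: B replaces A's seed-by-seed sowing simulation by a closed-form distribution: q,r = divmod(seeds, n-1) gives each non-origin house q seeds plus one extra for the first r houses after the origin, and the landing position is computed arithmetically; the short capture loop is unchanged.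
-- intended difference: For a negative pos (Python negative index) with board[pos] >= len(board), A's sowing wraps past the origin house and drops seeds into it because A compares the running non-negative position with the unnormalized negative index, so the skip never fires; A returns a board whose origin house received seeds, B normalizes the index and skips the origin house as the Oware sowing rule intends. — e.g. on oware_move([0, 0, 5, 0], -2): A returns [1, 1, 1, 0], B returns [2, 1, 0, 2]
import Mathlib
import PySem

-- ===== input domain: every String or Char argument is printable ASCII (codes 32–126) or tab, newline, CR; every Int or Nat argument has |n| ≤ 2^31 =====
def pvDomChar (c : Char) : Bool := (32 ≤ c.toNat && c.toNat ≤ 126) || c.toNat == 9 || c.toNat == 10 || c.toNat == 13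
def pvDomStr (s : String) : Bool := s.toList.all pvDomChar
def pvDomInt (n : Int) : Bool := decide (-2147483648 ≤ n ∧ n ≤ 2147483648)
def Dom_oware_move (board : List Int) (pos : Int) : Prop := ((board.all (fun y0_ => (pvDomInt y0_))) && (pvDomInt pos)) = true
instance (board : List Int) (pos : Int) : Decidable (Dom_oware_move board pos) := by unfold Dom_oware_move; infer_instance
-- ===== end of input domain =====

-- B replaces A's seed-by-seed sowing loop by a closed-form divmod distribution over the
-- n-1 non-origin houses with an arithmetic landing position (a different algorithm; not
-- claimed faster); the capture loop (identical in both Pythons) is shared as the helper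
-- owCapture.  Both Pythons mutate `board` in place and return it; the equivalence proved
-- here is about the return value.

-- ===== PORT A =====
-- capture loop, identical line for line in A and in B's Python; fuel board.length+1 is a
-- totality guard only (each iteration zeroes a house holding 2..3, so it runs < length+1 times)
def owCapture (n : Int) (b : List Int) (p : Int) : Nat → List Int
  | 0 => b
  | f + 1 =>
    if p ≥ PySem.Int.floordiv n 2 ∧ 2 ≤ PySem.List.pyGetD b p 0 ∧ PySem.List.pyGetD b p 0 ≤ 3 then
      owCapture n (PySem.List.pySetD b p 0) (PySem.Int.mod (p - 1) n) f
    else b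

-- A's sowing while-loop; fuel 2*sow+1 is a totality guard only (inside Pre_ the loop makes
-- at most sow + sow/(n-1) ≤ 2*sow steps)
def owSow (n orig : Int) (b : List Int) (p s : Int) : Nat → List Int × Int
  | 0 => (b, p)
  | f + 1 =>
    if s > 0 then
      let p' := PySem.Int.mod (p + 1) n
      if p' ≠ orig then
        owSow n orig (PySem.List.pySetD b p' (PySem.List.pyGetD b p' 0 + 1)) p' (s - 1) f
      else
        owSow n orig b p' s f
    else (b, p)

def oware_move (board : List Int) (pos : Int) : List Int :=
  let n : Int := board.length
  match PySem.List.pyGet? board pos with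
  | none => []   -- IndexError, excluded by Pre_
  | some sow =>
    let b0 := PySem.List.pySetD board pos 0
    let st := owSow n pos b0 pos sow (2 * sow.toNat + 1)
    owCapture n st.1 st.2 (board.length + 1)

-- ===== PORT B =====
def oware_move_alt (board : List Int) (pos : Int) : List Int :=
  let n : Int := board.length
  match PySem.List.pyGet? board pos with
  | none => []   -- IndexError, excluded by Pre_
  | some sow =>
    let b0 := PySem.List.pySetD board pos 0
    let orig := PySem.Int.mod pos n
    if sow > 0 then
      let q := PySem.Int.floordiv sow (n - 1)
      let r := PySem.Int.mod sow (n - 1)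
      let out := (PySem.List.pyRange 0 n 1).map (fun i =>
        if i = orig then 0
        else PySem.List.pyGetD b0 i 0 + q + (if PySem.Int.mod (i - orig) n ≤ r then 1 else 0))
      let p := if r > 0 then PySem.Int.mod (orig + r) n else PySem.Int.mod (orig - 1) n
      owCapture n out p (board.length + 1)
    else
      owCapture n b0 orig (board.length + 1)

-- ===== PRECONDITION & SPEC =====
-- Pre_ excludes out-of-range pos (A raises IndexError) and the one-house board with seeds
-- (A's sowing loop never terminates there; B raises ZeroDivisionError)
def Pre_oware_move (board : List Int) (pos : Int) : Prop :=
  PySem.Raise.InRange board.length pos ∧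
  ¬(board.length = 1 ∧ 0 < PySem.List.pyGetD board pos 0)
instance (board : List Int) (pos : Int) : Decidable (Pre_oware_move board pos) := by
  unfold Pre_oware_move; infer_instance

def pvWitness_oware_move : List Int × Int := ([4, 1, 2, 0, 2, 2], 2)

-- For a negative pos (Python negative index) with board[pos] >= len(board), A's sowing wraps past
-- the origin house and drops seeds into it (A compares the running non-negative position with the
-- unnormalized negative index, so the skip never fires); B normalizes the index and skips the
-- origin house as the Oware sowing rule intends.
def D_oware_move (board : List Int) (pos : Int) : Prop :=
  pos < 0 ∧ (board.length : Int) ≤ PySem.List.pyGetD board pos 0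
instance (board : List Int) (pos : Int) : Decidable (D_oware_move board pos) := by
  unfold D_oware_move; infer_instance

def Spec_oware_move (board : List Int) (pos : Int) (out : List Int) : Prop :=
  ¬ D_oware_move board pos → out = oware_move_alt board pos
instance (board : List Int) (pos : Int) (out : List Int) : Decidable (Spec_oware_move board pos out) := by
  unfold Spec_oware_move; infer_instance

def pvDiffWitness_oware_move : List Int × Int := ([0, 0, 5, 0], -2)
def pvDiffWitnessOut_oware_move : (List Int) × (List Int) := ([1, 1, 1, 0], [2, 1, 0, 2])

-- ===== CLAIM (what is proved, stated in full; the proofs are below) =====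
def Claim_unchanged_oware_move : Prop := ∀ (board : List Int) (pos : Int), Dom_oware_move board pos → Pre_oware_move board pos → Spec_oware_move board pos (oware_move board pos)
def Claim_changed_oware_move : Prop := Dom_oware_move (pvDiffWitness_oware_move.1) (pvDiffWitness_oware_move.2) ∧ Pre_oware_move (pvDiffWitness_oware_move.1) (pvDiffWitness_oware_move.2) ∧ D_oware_move (pvDiffWitness_oware_move.1) (pvDiffWitness_oware_move.2) ∧ oware_move (pvDiffWitness_oware_move.1) (pvDiffWitness_oware_move.2) = pvDiffWitnessOut_oware_move.1 ∧ oware_move_alt (pvDiffWitness_oware_move.1) (pvDiffWitness_oware_move.2) = pvDiffWitnessOut_oware_move.2 ∧ pvDiffWitnessOut_oware_move.1 ≠ pvDiffWitnessOut_oware_move.2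

-- ===== LEMMAS AND PROOFS =====

-- proof-side normal form: b with f i extra seeds in house i
def addCnt (b : List Int) (f : Nat → Int) : List Int :=
  (List.range b.length).map (fun i => b.getD i 0 + f i)

-- 0/1 indicator: house i received a seed during m sowing steps from position p
def cnt (n p : Int) (m : Nat) (i : Nat) : Int :=
  if 1 ≤ ((i : Int) - p) % n ∧ ((i : Int) - p) % n ≤ (m : Int) then 1 else 0

theorem addCnt_length (b : List Int) (f : Nat → Int) : (addCnt b f).length = b.length := by
  simp [addCnt]

theorem addCnt_getElem (b : List Int) (f : Nat → Int) (i : Nat) (h : i < (addCnt b f).length) :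
    (addCnt b f)[i] = b[i]'(by simpa [addCnt_length] using h) + f i := by
  simp only [addCnt_length] at h
  simp [addCnt, List.getD_eq_getElem?_getD, List.getElem?_eq_getElem h]

theorem addCnt_congr (b : List Int) (f g : Nat → Int) (h : ∀ i, i < b.length → f i = g i) :
    addCnt b f = addCnt b g := by
  unfold addCnt
  exact List.map_congr_left fun i hi => by rw [h i (List.mem_range.mp hi)]

theorem addCnt_zero (b : List Int) (f : Nat → Int) (h : ∀ i, i < b.length → f i = 0) :
    addCnt b f = b := by
  apply List.ext_getElem (by simp [addCnt_length])
  intro i h1 h2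
  rw [addCnt_getElem, h i h2]
  omega

theorem addCnt_addCnt (b : List Int) (f g : Nat → Int) :
    addCnt (addCnt b f) g = addCnt b (fun i => f i + g i) := by
  apply List.ext_getElem (by simp [addCnt_length])
  intro i h1 h2
  rw [addCnt_getElem, addCnt_getElem, addCnt_getElem]
  ring

theorem emodAddL (a b n : Int) : (a % n + b) % n = (a + b) % n := by
  conv_rhs => rw [Int.add_emod]
  rw [Int.add_emod (a % n) b, Int.emod_emod_of_dvd _ dvd_rfl]

theorem emodSubL (a b n : Int) : (a % n - b) % n = (a - b) % n := by
  conv_rhs => rw [Int.sub_emod]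
  rw [Int.sub_emod (a % n) b, Int.emod_emod_of_dvd _ dvd_rfl]

theorem emod_shift (x n : Int) : (x + n) % n = x % n := by
  have := Int.add_mul_emod_self_left x n 1
  simpa using this

theorem emod_small (x n : Int) (hn : 0 < n) (h1 : -n ≤ x) (h2 : x < n) :
    x % n = if 0 ≤ x then x else x + n := by
  split
  · exact Int.emod_eq_of_lt (by omega) h2
  · rw [← emod_shift, Int.emod_eq_of_lt (by omega) (by omega)]

theorem owSow_zero (n g : Int) (b : List Int) (p s : Int) (f : Nat) (hs : ¬ s > 0) :
    owSow n g b p s f = (b, p) := by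
  cases f <;> simp [owSow, hs]

theorem skip_ok (n g : Int) (hn : 0 < n) (hg0 : 0 ≤ g) (hg1 : g < n)
    (k : Nat) (hk1 : 1 ≤ k) (hk2 : (k : Int) ≤ n - 1) : (g + (k : Int)) % n ≠ g := by
  have h2 : (g + (k : Int)) % n = (g + (k : Int) - n) % n := by
    rw [← emod_shift (g + (k : Int) - n) n]; ring_nf
  rw [h2, emod_small _ _ hn (by omega) (by omega)]
  split <;> omega

-- sowing one more seed refines the seed-count indicator by one step
theorem step_board (n p : Int) (b : List Int) (m : Nat)
    (hn : 2 ≤ n) (hlen : (b.length : Int) = n) (hm : (m : Int) + 1 ≤ n - 1) :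
    addCnt (PySem.List.pySetD b ((p + 1) % n) (PySem.List.pyGetD b ((p + 1) % n) 0 + 1))
        (cnt n ((p + 1) % n) m)
      = addCnt b (cnt n p (m + 1)) := by
  have hp'0 : 0 ≤ (p + 1) % n := Int.emod_nonneg _ (by omega)
  have hp'1 : (p + 1) % n < n := Int.emod_lt_of_pos _ (by omega)
  have hgd : PySem.List.pyGetD b ((p + 1) % n) 0 = b[((p + 1) % n).toNat]'(by omega) :=
    PySem.List.pyGetD_eq_getElem b 0 hp'0 (by omega)
  rw [hgd, PySem.List.pySetD_of_nonneg _ _ hp'0]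
  apply List.ext_getElem (by simp [addCnt_length])
  intro i h1 h2
  rw [addCnt_getElem, addCnt_getElem]
  have hilen : i < b.length := by simpa [addCnt_length] using h2
  have hi' : (i : Int) < n := by omega
  rw [List.getElem_set]
  have he0 : 0 ≤ ((i : Int) - p) % n := Int.emod_nonneg _ (by omega)
  have he1 : ((i : Int) - p) % n < n := Int.emod_lt_of_pos _ (by omega)
  have hd : ((i : Int) - (p + 1) % n) % n = (((i : Int) - p) % n - 1) % n := by
    conv_lhs => rw [Int.sub_emod]
    rw [Int.emod_emod_of_dvd _ dvd_rfl, ← Int.sub_emod, emodSubL]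
    congr 1; ring
  have hsm := emod_small (((i : Int) - p) % n - 1) n (by omega) (by omega) (by omega)
  have hiffp : (((p + 1) % n).toNat = i) ↔ ((((i : Int) - p) % n - 1) % n = 0) := by
    rw [← hd, emod_small ((i : Int) - (p + 1) % n) n (by omega) (by omega) (by omega)]
    split <;> omega
  unfold cnt
  rw [hd, hsm]
  rw [hsm] at hiffp
  by_cases hcase : 0 ≤ ((i : Int) - p) % n - 1
  · rw [if_pos hcase] at hiffp ⊢
    by_cases he1' : ((i : Int) - p) % n = 1
    · have hin : ((p + 1) % n).toNat = i := hiffp.mpr (by omega)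
      subst hin
      rw [if_pos rfl, if_neg (by omega), if_pos (by push_cast; omega)]
      omega
    · have hnin : ¬ (((p + 1) % n).toNat = i) := by rw [hiffp]; omega
      rw [if_neg hnin]
      push_cast
      split_ifs <;> omega
  · rw [if_neg hcase] at hiffp ⊢
    have hnin : ¬ (((p + 1) % n).toNat = i) := by rw [hiffp]; omega
    rw [if_neg hnin]
    push_cast
    split_ifs <;> omega

-- one straight run of m sowing steps none of which hits the origin house
theorem owSow_run (m : Nat) : ∀ (n g : Int) (b : List Int) (p s : Int) (f : Nat),
    2 ≤ n → (b.length : Int) = n → (0 ≤ p ∨ 1 ≤ m) → -n ≤ p → p < n →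
    (m : Int) ≤ n - 1 → (m : Int) ≤ s → m ≤ f →
    (∀ k : Nat, 1 ≤ k → k ≤ m → (p + (k : Int)) % n ≠ g) →
    owSow n g b p s f =
      owSow n g (addCnt b (cnt n p m)) ((p + (m : Int)) % n) (s - (m : Int)) (f - m) := by
  induction m with
  | zero =>
    intro n g b p s f hn hlen hp0 hpl hp1 _ _ _ _
    have hp0' : 0 ≤ p := by omega
    have hb : addCnt b (cnt n p 0) = b := by
      apply addCnt_zero
      intro i _
      unfold cnt
      split <;> omega
    rw [hb]
    simp [Int.emod_eq_of_lt hp0' hp1]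
  | succ m ih =>
    intro n g b p s f hn hlen _ hpl hp1 hm hms hf hskip
    have hs0 : s > 0 := by
      have : ((m : Int) + 1) ≤ s := by push_cast at hms; omega
      omega
    obtain ⟨f', rfl⟩ : ∃ f', f = f' + 1 := ⟨f - 1, by omega⟩
    have hmodeq : PySem.Int.mod (p + 1) n = (p + 1) % n :=
      PySem.Int.mod_eq_emod_of_pos (by omega)
    have hne : (p + 1) % n ≠ g := by
      have := hskip 1 (by omega) (by omega)
      simpa using this
    have hp'0 : 0 ≤ (p + 1) % n := Int.emod_nonneg _ (by omega)
    have hp'1 : (p + 1) % n < n := Int.emod_lt_of_pos _ (by omega)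
    have step : owSow n g b p s (f' + 1) =
        owSow n g (PySem.List.pySetD b ((p + 1) % n)
          (PySem.List.pyGetD b ((p + 1) % n) 0 + 1)) ((p + 1) % n) (s - 1) f' := by
      simp only [owSow, hmodeq]
      rw [if_pos hs0, if_pos hne]
    have hB := step_board n p b m hn hlen (by push_cast at hm ⊢; omega)
    have hP : ((p + 1) % n + (m : Int)) % n = (p + ((m + 1 : Nat) : Int)) % n := by
      rw [emodAddL]; congr 1; push_cast; ring
    have hS : s - 1 - (m : Int) = s - (((m + 1 : Nat)) : Int) := by push_cast; ring
    have hF : f' - m = (f' + 1) - (m + 1) := by omega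
    rw [step, ih n g _ ((p + 1) % n) (s - 1) f' hn
      (by rw [PySem.List.length_pySetD]; exact hlen) (Or.inl hp'0) (by omega) hp'1
      (by push_cast at hm ⊢; omega) (by push_cast at hms ⊢; omega) (by omega) ?_,
      hB, hP, hS, hF]
    intro k hk1 hk2
    have h1 : ((p + 1) % n + (k : Int)) % n = (p + (((k + 1) : Nat) : Int)) % n := by
      rw [emodAddL]; congr 1; push_cast; ring
    rw [h1]
    exact hskip (k + 1) (by omega) (by push_cast at hk2 ⊢; omega)

-- the seed-count indicator of one partial run, in divmod form
theorem cnt_formula_pt (n g s : Int) (i : Nat) (hn : 2 ≤ n) (hg0 : 0 ≤ g) (hg1 : g < n)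
    (hi : (i : Int) < n) (hs1 : 1 ≤ s) (hs2 : s ≤ n - 1) :
    cnt n g s.toNat i =
      if (i : Int) = g then 0
      else s / (n - 1) + if ((i : Int) - g) % n ≤ s % (n - 1) then 1 else 0 := by
  have hcast : ((s.toNat : Int)) = s := by omega
  have he0 : 0 ≤ ((i : Int) - g) % n := Int.emod_nonneg _ (by omega)
  have he1 : ((i : Int) - g) % n < n := Int.emod_lt_of_pos _ (by omega)
  have hiff : ((i : Int) = g) ↔ ((i : Int) - g) % n = 0 := by
    rw [emod_small _ _ (by omega) (by omega) (by omega)]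
    split <;> omega
  unfold cnt
  rw [hcast]
  by_cases hc : s ≤ n - 2
  · have h1 : s / (n - 1) = 0 := Int.ediv_eq_zero_of_lt (by omega) (by omega)
    have h2 : s % (n - 1) = s := Int.emod_eq_of_lt (by omega) (by omega)
    rw [h1, h2]
    split_ifs <;> omega
  · have hseq : s = n - 1 := by omega
    have h1 : s / (n - 1) = 1 := by rw [hseq]; exact Int.ediv_self (by omega)
    have h2 : s % (n - 1) = 0 := by rw [hseq]; exact Int.emod_self
    rw [h1, h2]
    split_ifs <;> omega

-- the landing position of one partial run, in divmod form
theorem landing_small (n g s : Int) (hn : 2 ≤ n) (hg0 : 0 ≤ g) (hg1 : g < n)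
    (hs1 : 1 ≤ s) (hs2 : s ≤ n - 1) :
    (g + ((s.toNat : Int))) % n =
      if 0 < s % (n - 1) then (g + s % (n - 1)) % n else (g - 1) % n := by
  have hcast : ((s.toNat : Int)) = s := by omega
  rw [hcast]
  by_cases hc : s ≤ n - 2
  · have h1 : s % (n - 1) = s := Int.emod_eq_of_lt (by omega) (by omega)
    rw [h1, if_pos (by omega)]
  · have hseq : s = n - 1 := by omega
    have h1 : s % (n - 1) = 0 := by rw [hseq]; exact Int.emod_self
    rw [h1, if_neg (by omega), hseq, show g + (n - 1) = (g - 1) + n by ring, emod_shift]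

-- the whole sowing loop from the origin house, in closed divmod form
theorem owSow_main : ∀ (K : Nat) (n g s : Int) (b : List Int) (f : Nat),
    s.toNat ≤ K → 2 ≤ n → (b.length : Int) = n → 0 ≤ g → g < n → 1 ≤ s → 2 * s.toNat ≤ f →
    owSow n g b g s f =
      (addCnt b (fun i => if (i : Int) = g then 0
          else s / (n - 1) + if ((i : Int) - g) % n ≤ s % (n - 1) then 1 else 0),
       if 0 < s % (n - 1) then (g + s % (n - 1)) % n else (g - 1) % n) := by
  intro K
  induction K with
  | zero => intro n g s b f hK hn hlen hg0 hg1 hs1 hf; omega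
  | succ K ih =>
    intro n g s b f hK hn hlen hg0 hg1 hs1 hf
    by_cases hsmall : s ≤ n - 1
    · -- one partial run, no wrap past the origin
      rw [owSow_run s.toNat n g b g s f hn hlen (Or.inl hg0) (by omega) hg1 (by omega)
        (by omega) (by omega)
        (fun k hk1 hk2 => skip_ok n g (by omega) hg0 hg1 k hk1 (by omega)),
        owSow_zero _ _ _ _ _ _ (by omega)]
      simp only [Prod.mk.injEq]
      refine ⟨?_, ?_⟩
      · apply addCnt_congr
        intro i hilen
        have hi : (i : Int) < n := by omega
        exact cnt_formula_pt n g s i hn hg0 hg1 hi hs1 hsmall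
      · exact landing_small n g s hn hg0 hg1 hs1 hsmall
    · -- a full lap, then recurse on s - (n-1)
      have hm : (((n - 1).toNat : Int)) = n - 1 := by omega
      rw [owSow_run (n - 1).toNat n g b g s f hn hlen (Or.inl hg0) (by omega) hg1 (by omega)
        (by omega) (by omega)
        (fun k hk1 hk2 => skip_ok n g (by omega) hg0 hg1 k hk1 (by omega))]
      rw [hm]
      have hp1 : (g + (n - 1)) % n = (g - 1) % n := by
        rw [show g + (n - 1) = (g - 1) + n by ring, emod_shift]
      rw [hp1]
      have hs1' : s - (n - 1) > 0 := by omega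
      obtain ⟨f1, hf1⟩ : ∃ f1, f - (n - 1).toNat = f1 + 1 := ⟨f - (n - 1).toNat - 1, by omega⟩
      rw [hf1]
      have hgmod : PySem.Int.mod ((g - 1) % n + 1) n = g := by
        rw [PySem.Int.mod_eq_emod_of_pos (by omega), emodAddL,
          show g - 1 + 1 = g by ring, Int.emod_eq_of_lt hg0 hg1]
      have step : owSow n g (addCnt b (cnt n g (n - 1).toNat)) ((g - 1) % n) (s - (n - 1)) (f1 + 1)
          = owSow n g (addCnt b (cnt n g (n - 1).toNat)) g (s - (n - 1)) f1 := by
        simp only [owSow, hgmod]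
        rw [if_pos hs1', if_neg (by simp)]
      rw [step, ih n g (s - (n - 1)) _ f1 (by omega) hn
        (by rw [addCnt_length]; exact hlen) hg0 hg1 (by omega) (by omega),
        addCnt_addCnt]
      have hdiv : s / (n - 1) = (s - (n - 1)) / (n - 1) + 1 := by
        conv_lhs => rw [show s = (s - (n - 1)) + 1 * (n - 1) by ring]
        rw [Int.add_mul_ediv_right _ _ (show n - 1 ≠ 0 by omega)]
      have hmod2 : s % (n - 1) = (s - (n - 1)) % (n - 1) := by
        conv_lhs => rw [show s = (s - (n - 1)) + (n - 1) by ring]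
        rw [emod_shift]
      simp only [Prod.mk.injEq]
      refine ⟨?_, by rw [hmod2]⟩
      apply addCnt_congr
      intro i hilen
      have hi : (i : Int) < n := by omega
      rw [hdiv, hmod2]
      by_cases hig : (i : Int) = g
      · have hz : ((i : Int) - g) % n = 0 := by rw [hig]; simp
        unfold cnt
        rw [if_neg (by omega)]
        simp [hig]
      · have he0 : 0 ≤ ((i : Int) - g) % n := Int.emod_nonneg _ (by omega)
        have he1 : ((i : Int) - g) % n < n := Int.emod_lt_of_pos _ (by omega)
        have hne0 : ((i : Int) - g) % n ≠ 0 := by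
          rw [emod_small _ _ (by omega) (by omega) (by omega)]
          split <;> omega
        have hcond : 1 ≤ ((i : Int) - g) % n ∧ ((i : Int) - g) % n ≤ (((n - 1).toNat : Int)) :=
          ⟨by omega, by omega⟩
        unfold cnt
        rw [if_pos hcond, if_neg hig, if_neg hig]
        ring

-- Python list assignment at a negative in-range index
theorem pySetD_neg (xs : List Int) (i : Int) (v : Int)
    (h1 : -(xs.length : Int) ≤ i) (h2 : i < 0) :
    PySem.List.pySetD xs i v = xs.set (xs.length - (-i).toNat) v := by
  unfold PySem.List.pySetD PySem.List.pySet? PySem.List.pyIdx?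
  rw [if_neg (by omega), if_pos (by omega)]
  rfl

-- the origin house holds 0 right after being emptied
theorem pyGetD_b0_orig (board : List Int) (pos : Int)
    (h1 : -(board.length : Int) ≤ pos) (h2 : pos < (board.length : Int)) :
    PySem.List.pyGetD (PySem.List.pySetD board pos 0)
      (PySem.Int.mod pos (board.length : Int)) 0 = 0 := by
  have hn : 0 < (board.length : Int) := by omega
  rw [PySem.Int.mod_eq_emod_of_pos hn, emod_small _ _ hn h1 h2]
  by_cases hp : 0 ≤ pos
  · rw [if_pos hp, PySem.List.pySetD_of_nonneg _ _ hp,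
      PySem.List.pyGetD_eq_getElem _ 0 hp (by rw [List.length_set]; omega)]
    exact List.getElem_set_self _
  · rw [if_neg hp, pySetD_neg _ _ _ h1 (by omega),
      PySem.List.pyGetD_eq_getElem _ 0 (by omega) (by rw [List.length_set]; push_cast; omega)]
    rw [List.getElem_set, if_pos (by omega)]

-- B's comprehension as an addCnt over the emptied board
theorem out_formula (b0 : List Int) (n g q r : Int)
    (hlen : (b0.length : Int) = n) (hg0 : 0 ≤ g) (hg1 : g < n)
    (h0 : PySem.List.pyGetD b0 g 0 = 0) :
    (PySem.List.pyRange 0 n 1).map (fun i =>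
        if i = g then 0
        else PySem.List.pyGetD b0 i 0 + q + (if (i - g) % n ≤ r then 1 else 0))
      = addCnt b0 (fun i => if (i : Int) = g then 0
          else q + if ((i : Int) - g) % n ≤ r then 1 else 0) := by
  rw [PySem.List.pyRange_one]
  unfold addCnt
  have hcnt : (n - 0).toNat = b0.length := by omega
  rw [hcnt, List.map_map]
  apply List.map_congr_left
  intro k hk
  have hk' : k < b0.length := List.mem_range.mp hk
  have hkd : b0.getD k 0 = PySem.List.pyGetD b0 (k : Int) 0 :=
    (PySem.List.pyGetD_natCast b0 k 0).symm
  simp only [Function.comp_apply, zero_add]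
  by_cases hkg : (k : Int) = g
  · rw [if_pos hkg, if_pos hkg, hkd, hkg, h0]
    omega
  · rw [if_neg hkg, if_neg hkg, hkd]
    ring

theorem oware_move_spec : Claim_unchanged_oware_move := by
  intro board pos _hDom hPre hnD
  have hlo : -(board.length : Int) ≤ pos := hPre.1.1
  have hhi : pos < (board.length : Int) := hPre.1.2
  have hN1 := hPre.2
  have hlen1 : 1 ≤ board.length := by omega
  obtain ⟨sow, hsow⟩ : ∃ v, PySem.List.pyGet? board pos = some v := by
    cases h : PySem.List.pyGet? board pos with
    | none =>
      rw [PySem.List.pyGet?_eq_none_iff] at h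
      exact absurd hPre.1 h
    | some v => exact ⟨v, rfl⟩
  have hPD : PySem.List.pyGetD board pos 0 = sow := by
    unfold PySem.List.pyGetD
    rw [hsow]
    rfl
  simp only [oware_move, oware_move_alt, hsow]
  set n : Int := (board.length : Int) with hn
  set b0 : List Int := PySem.List.pySetD board pos 0 with hb0
  have hlenb0 : (b0.length : Int) = n := by
    rw [hb0, PySem.List.length_pySetD, hn]
  have h0orig : PySem.List.pyGetD b0 (PySem.Int.mod pos n) 0 = 0 :=
    pyGetD_b0_orig board pos hlo hhi
  by_cases hs : sow > 0
  · rw [if_pos hs]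
    have hn2 : 2 ≤ n := by
      by_contra hcon
      exact hN1 ⟨by omega, by rw [hPD]; omega⟩
    by_cases hp : 0 ≤ pos
    · -- non-negative origin: the closed form of the sowing loop
      have horig : PySem.Int.mod pos n = pos := by
        rw [PySem.Int.mod_eq_emod_of_pos (by omega), Int.emod_eq_of_lt hp hhi]
      rw [horig]
      have h0' : PySem.List.pyGetD b0 pos 0 = 0 := by rw [← horig]; exact h0orig
      rw [owSow_main sow.toNat n pos sow b0 _ le_rfl hn2 hlenb0 hp hhi (by omega) (by omega)]
      simp only [PySem.Int.floordiv_eq_ediv_of_pos (show (0:Int) < n - 1 by omega),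
        PySem.Int.mod_eq_emod_of_pos (show (0:Int) < n - 1 by omega),
        PySem.Int.mod_eq_emod_of_pos (show (0:Int) < n by omega), gt_iff_lt]
      rw [out_formula b0 n pos (sow / (n - 1)) (sow % (n - 1)) hlenb0 hp hhi h0']
    · -- negative origin: A never skips, but with sow < n no seed reaches the origin house
      have hsn : sow < n := by
        by_contra hcon
        exact hnD ⟨by omega, by rw [hPD]; omega⟩
      have horig : PySem.Int.mod pos n = pos + n := by
        rw [PySem.Int.mod_eq_emod_of_pos (by omega),
          emod_small pos n (by omega) (by omega) (by omega), if_neg hp]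
      rw [horig]
      have h0' : PySem.List.pyGetD b0 (pos + n) 0 = 0 := by rw [← horig]; exact h0orig
      rw [owSow_run sow.toNat n pos b0 pos sow _ hn2 hlenb0 (Or.inr (by omega)) hlo hhi
        (by omega) (by omega) (by omega)
        (fun k hk1 hk2 => by
          have := Int.emod_nonneg (pos + (k : Int)) (show n ≠ 0 by omega)
          omega),
        owSow_zero _ _ _ _ _ _ (by omega)]
      have hcnt_shift : cnt n pos sow.toNat = cnt n (pos + n) sow.toNat := by
        funext i
        unfold cnt
        rw [show (i : Int) - pos = ((i : Int) - (pos + n)) + n by ring, emod_shift]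
      have hboard : addCnt b0 (cnt n (pos + n) sow.toNat)
          = addCnt b0 (fun i => if (i : Int) = pos + n then 0
              else sow / (n - 1) + if ((i : Int) - (pos + n)) % n ≤ sow % (n - 1) then 1 else 0) := by
        apply addCnt_congr
        intro i hi
        exact cnt_formula_pt n (pos + n) sow i hn2 (by omega) (by omega) (by omega)
          (by omega) (by omega)
      have hland : (pos + ((sow.toNat : Int))) % n =
          if 0 < sow % (n - 1) then ((pos + n) + sow % (n - 1)) % n else ((pos + n) - 1) % n := by
        rw [show pos + ((sow.toNat : Int)) = ((pos + n) + ((sow.toNat : Int))) - n by ring]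
        rw [show ((pos + n) + ((sow.toNat : Int))) - n
            = ((pos + n) + ((sow.toNat : Int))) + n * (-1) by ring,
          Int.add_mul_emod_self_left]
        exact landing_small n (pos + n) sow hn2 (by omega) (by omega) (by omega) (by omega)
      rw [hcnt_shift, hboard, hland]
      simp only [PySem.Int.floordiv_eq_ediv_of_pos (show (0:Int) < n - 1 by omega),
        PySem.Int.mod_eq_emod_of_pos (show (0:Int) < n - 1 by omega),
        PySem.Int.mod_eq_emod_of_pos (show (0:Int) < n by omega), gt_iff_lt]
      rw [out_formula b0 n (pos + n) (sow / (n - 1)) (sow % (n - 1)) hlenb0 (by omega) (by omega) h0']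
  · -- no seeds: the board is only emptied at the origin
    rw [if_neg hs, owSow_zero _ _ _ _ _ _ hs]
    by_cases hp : 0 ≤ pos
    · rw [PySem.Int.mod_eq_emod_of_pos (by omega), Int.emod_eq_of_lt hp hhi]
    · have hA : owCapture n b0 pos (board.length + 1) = b0 := by
        simp only [owCapture]
        rw [if_neg ?_]
        rintro ⟨hc1, -, -⟩
        rw [PySem.Int.floordiv_eq_ediv_of_pos (show (0:Int) < 2 by omega)] at hc1
        have := Int.ediv_nonneg (show (0:Int) ≤ n by omega) (show (0:Int) ≤ 2 by omega)
        omega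
      have hB : owCapture n b0 (PySem.Int.mod pos n) (board.length + 1) = b0 := by
        simp only [owCapture]
        rw [if_neg ?_]
        rintro ⟨-, hc2, -⟩
        rw [h0orig] at hc2
        omega
      rw [hA, hB]

-- ===== VERDICT (by name: the statement is the Claim_ definition above) =====
theorem oware_move_changed : Claim_changed_oware_move := by
  unfold Claim_changed_oware_move; decide
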